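-- pv_equiv track=rewrite | github.com/vothnha26/Game | group5_algo.py | DoiMotKhacNhau
-- ===== SOURCE A (Python) =====
-- def DoiMotKhacNhau(board):  # Function name kept
--     seen = set()
--     count = 0
--     if not isinstance(board, list) or len(board) != 3:
--         return False
--     for row in board:
--         if not isinstance(row, list) or len(row) != 3:
--             return False
--         for val in row:
--             if not isinstance(val, int) or not (0 <= val <= 8):
--                 return False
--             if val in seen:
--                 return False
--             seen.add(val)
--             count += 1
--     return count == 9
-- ===== SOURCE B (Python) =====
-- def DoiMotKhacNhau(board):  # Function name kept
--     if not isinstance(board, list) or len(board) != 3: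
--         return False
--     flat = []
--     for row in board:
--         if not isinstance(row, list) or len(row) != 3:
--             return False
--         for v in row:
--             if not isinstance(v, int):
--                 return False
--         flat.extend(row)
--     return sorted(flat) == list(range(9))
-- ===== Notes on version B (the rewrite author's own statement) =====
-- stated objective: simpler
-- what changed: Replaces the online set-membership/range/count bookkeeping with one permutation check: flatten the nine elements and test sorted(flat) == list(range(9)), which enforces range and distinctness at once.
import Mathlib
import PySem

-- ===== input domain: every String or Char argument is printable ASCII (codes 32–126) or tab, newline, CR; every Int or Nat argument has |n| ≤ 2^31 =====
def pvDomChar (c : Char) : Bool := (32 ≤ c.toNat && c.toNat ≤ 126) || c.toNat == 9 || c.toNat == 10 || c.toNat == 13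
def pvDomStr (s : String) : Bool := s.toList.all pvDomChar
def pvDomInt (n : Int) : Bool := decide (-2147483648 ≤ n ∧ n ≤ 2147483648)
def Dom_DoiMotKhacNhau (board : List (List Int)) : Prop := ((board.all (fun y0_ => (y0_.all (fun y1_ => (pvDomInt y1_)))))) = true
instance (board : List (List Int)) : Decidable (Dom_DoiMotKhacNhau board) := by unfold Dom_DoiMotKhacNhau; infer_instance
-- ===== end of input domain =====

-- B replaces A's online set/range/count bookkeeping with one permutation check
-- (sorted(flat) == list(range(9))); objective: simpler. Return-value equivalence only.

-- ===== PORT A =====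
-- inner loop body: one 'val' of a row, state = Some (seen, count) or None = early 'return False'
def pvStepValA (st : Option (PySem.Set Int × Int)) (val : Int) : Option (PySem.Set Int × Int) :=
  match st with
  | none => none
  | some (seen, count) =>
      if ¬ (0 ≤ val ∧ val ≤ 8) then none
      else if PySem.Set.contains seen val then none
      else some (PySem.Set.add seen val, count + 1)

-- outer loop body: one 'row'
def pvStepRowA (st : Option (PySem.Set Int × Int)) (row : List Int) : Option (PySem.Set Int × Int) :=
  match st with
  | none => none
  | some s => if row.length ≠ 3 then none else row.foldl pvStepValA (some s)

def DoiMotKhacNhau (board : List (List Int)) : Bool :=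
  if board.length ≠ 3 then false
  else
    match board.foldl pvStepRowA (some (PySem.Set.empty, 0)) with
    | none => false
    | some (_, count) => count == (9 : Int)

-- ===== PORT B =====
def DoiMotKhacNhau_alt (board : List (List Int)) : Bool :=
  if board.length ≠ 3 then false
  else if board.any (fun row => row.length ≠ 3) then false
  else decide (PySem.List.sorted (board.foldl (fun flat row => flat ++ row) []) (fun x => x) false
                 = PySem.List.pyRange 0 9 1)

-- ===== PRECONDITION & SPEC =====
def Spec_DoiMotKhacNhau (board : List (List Int)) (out : Bool) : Prop := out = DoiMotKhacNhau_alt board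
instance (board : List (List Int)) (out : Bool) : Decidable (Spec_DoiMotKhacNhau board out) := by unfold Spec_DoiMotKhacNhau; infer_instance

-- ===== CLAIM (what is proved, stated in full; the proofs are below) =====
def Claim_equal_DoiMotKhacNhau : Prop := ∀ (board : List (List Int)), Dom_DoiMotKhacNhau board → Spec_DoiMotKhacNhau board (DoiMotKhacNhau board)

-- ===== LEMMAS AND PROOFS =====

theorem pvFoldValA_none (l : List Int) : l.foldl pvStepValA none = none := by
  induction l with
  | nil => rfl
  | cons v t ih => simpa [pvStepValA] using ih

-- the inner loop over a list of values, characterised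
theorem pvFoldValA_char (l : List Int) (s : PySem.Set Int) (c : Int) :
    l.foldl pvStepValA (some (s, c)) =
      if ((∀ v ∈ l, (0 ≤ v ∧ v ≤ 8) ∧ v ∉ s) ∧ l.Nodup)
      then some (l.foldl PySem.Set.add s, c + l.length) else none := by
  induction l generalizing s c with
  | nil => simp
  | cons v t ih =>
    by_cases hr : (0 ≤ v ∧ v ≤ 8)
    · by_cases hm : v ∈ s
      · have hcond : ¬ ((∀ w ∈ v :: t, (0 ≤ w ∧ w ≤ 8) ∧ w ∉ s) ∧ (v :: t).Nodup) := by
          rintro ⟨h1, -⟩; exact (h1 v (List.mem_cons_self)).2 hm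
        rw [List.foldl_cons]
        have hstep : pvStepValA (some (s, c)) v = none := by
          simp [pvStepValA, hr, PySem.Set.contains, hm]
        rw [hstep, pvFoldValA_none, if_neg hcond]
      · rw [List.foldl_cons]
        have hstep : pvStepValA (some (s, c)) v = some (PySem.Set.add s v, c + 1) := by
          simp [pvStepValA, hr, PySem.Set.contains, hm]
        rw [hstep, ih]
        have hcong : ((∀ w ∈ t, (0 ≤ w ∧ w ≤ 8) ∧ w ∉ PySem.Set.add s v) ∧ t.Nodup)
            ↔ ((∀ w ∈ v :: t, (0 ≤ w ∧ w ≤ 8) ∧ w ∉ s) ∧ (v :: t).Nodup) := by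
          simp only [PySem.Set.mem_add, List.mem_cons, List.nodup_cons]
          constructor
          · rintro ⟨h1, h2⟩
            refine ⟨?_, ?_, h2⟩
            · rintro w (rfl | hw)
              · exact ⟨hr, hm⟩
              · exact ⟨(h1 w hw).1, fun hws => (h1 w hw).2 (Or.inl hws)⟩
            · intro hvt
              exact (h1 v hvt).2 (Or.inr rfl)
          · rintro ⟨h1, hvt, h2⟩
            refine ⟨fun w hw => ⟨(h1 w (Or.inr hw)).1, ?_⟩, h2⟩
            rintro (hws | rfl)
            · exact (h1 w (Or.inr hw)).2 hws
            · exact hvt hw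
        rw [if_congr hcong rfl rfl]
        rcases Decidable.em ((∀ w ∈ v :: t, (0 ≤ w ∧ w ≤ 8) ∧ w ∉ s) ∧ (v :: t).Nodup) with h | h
        · rw [if_pos h, if_pos h]
          have : c + 1 + (t.length : Int) = c + ((v :: t).length : Int) := by
            simp; omega
          simp [this]
        · rw [if_neg h, if_neg h]
    · have hcond : ¬ ((∀ w ∈ v :: t, (0 ≤ w ∧ w ≤ 8) ∧ w ∉ s) ∧ (v :: t).Nodup) := by
        rintro ⟨h1, -⟩; exact hr (h1 v (List.mem_cons_self)).1
      rw [List.foldl_cons]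
      have hstep : pvStepValA (some (s, c)) v = none := by
        simp [pvStepValA, hr]
      rw [hstep, pvFoldValA_none, if_neg hcond]

theorem pvStepRowA_eq (st : Option (PySem.Set Int × Int)) (row : List Int)
    (h : row.length = 3) : pvStepRowA st row = row.foldl pvStepValA st := by
  cases st with
  | none => simp [pvStepRowA, pvFoldValA_none]
  | some s => simp [pvStepRowA, h]

-- main case: a 3×3 board; flat = the nine values
theorem pvMain (r1 r2 r3 : List Int) (h1 : r1.length = 3) (h2 : r2.length = 3)
    (h3 : r3.length = 3) :
    DoiMotKhacNhau [r1, r2, r3] = DoiMotKhacNhau_alt [r1, r2, r3] := by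
  have hflatlen : (r1 ++ r2 ++ r3).length = 9 := by simp [h1, h2, h3]
  have hA : [r1, r2, r3].foldl pvStepRowA (some (PySem.Set.empty, 0))
      = (r1 ++ r2 ++ r3).foldl pvStepValA (some (PySem.Set.empty, 0)) := by
    simp only [List.foldl_cons, List.foldl_nil, List.foldl_append,
      pvStepRowA_eq _ _ h1, pvStepRowA_eq _ _ h2, pvStepRowA_eq _ _ h3]
  set flat := r1 ++ r2 ++ r3 with hflat
  have hcond : (PySem.List.sorted flat (fun x => x) false = PySem.List.pyRange 0 9 1)
      ↔ ((∀ v ∈ flat, 0 ≤ v ∧ v ≤ 8) ∧ flat.Nodup) := by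
    constructor
    · intro hs
      have hperm : flat.Perm (PySem.List.pyRange 0 9 1) := by
        have := PySem.List.sorted_perm flat (fun x => x) false
        rw [hs] at this
        exact this.symm
      constructor
      · intro v hv
        have : v ∈ PySem.List.pyRange 0 9 1 := hperm.mem_iff.mp hv
        have := PySem.List.mem_pyRange_one.mp this
        exact ⟨this.1, by omega⟩
      · exact hperm.nodup_iff.mpr (PySem.List.nodup_pyRange_one 0 9)
    · rintro ⟨hrange, hnd⟩
      have hsub : flat ⊆ PySem.List.pyRange 0 9 1 := by
        intro v hv
        have := hrange v hv
        exact PySem.List.mem_pyRange_one.mpr ⟨this.1, by omega⟩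
      have hlen : (PySem.List.pyRange 0 9 1).length ≤ flat.length := by
        rw [PySem.List.length_pyRange_one, hflatlen]; rfl
      have hperm : flat.Perm (PySem.List.pyRange 0 9 1) :=
        (List.subperm_of_subset hnd hsub).perm_of_length_le hlen
      exact PySem.List.sorted_eq_of_perm_of_pairwise_lt flat (PySem.List.pyRange 0 9 1)
        (fun x => x) hperm.symm (PySem.List.pairwise_lt_pyRange_one 0 9)
  have hB : List.foldl (fun flat row => flat ++ row) ([] : List Int) [r1, r2, r3] = flat := by
    simp [hflat]
  rw [DoiMotKhacNhau, DoiMotKhacNhau_alt]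
  simp only [List.length_cons, List.length_nil, hA, pvFoldValA_char, List.any_cons,
    List.any_nil, h1, h2, h3, hB, hflatlen]
  norm_num
  by_cases h : (∀ v ∈ flat, 0 ≤ v ∧ v ≤ 8) ∧ flat.Nodup
  · rw [if_pos h]
    simp [hcond.mpr h]
  · rw [if_neg h]
    have hns : ¬ (PySem.List.sorted flat (fun x => x) false = PySem.List.pyRange 0 9 1) :=
      fun hs => h (hcond.mp hs)
    simp [hns]

theorem pvFoldRowA_none (l : List (List Int)) : l.foldl pvStepRowA none = none := by
  induction l with
  | nil => rfl
  | cons r t ih => simpa [pvStepRowA] using ih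

theorem pvFoldRowA_badrow (l : List (List Int)) (h : ∃ r ∈ l, r.length ≠ 3)
    (st : Option (PySem.Set Int × Int)) : l.foldl pvStepRowA st = none := by
  induction l generalizing st with
  | nil => simp at h
  | cons r t ih =>
    rw [List.foldl_cons]
    rcases h with ⟨r', hr', hlen⟩
    rcases List.mem_cons.mp hr' with rfl | hr't
    · have : pvStepRowA st r' = none := by
        cases st with
        | none => rfl
        | some s => simp [pvStepRowA, hlen]
      rw [this, pvFoldRowA_none]
    · exact ih ⟨r', hr't, hlen⟩ _

-- ===== VERDICT (by name: the statement is the Claim_ definition above) =====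
theorem DoiMotKhacNhau_spec : Claim_equal_DoiMotKhacNhau := by
  intro board _
  unfold Spec_DoiMotKhacNhau
  match board with
  | [] => rfl
  | [_] => rfl
  | [_, _] => rfl
  | r1 :: r2 :: r3 :: r4 :: t =>
    simp [DoiMotKhacNhau, DoiMotKhacNhau_alt]
  | [r1, r2, r3] =>
    by_cases hball : r1.length = 3 ∧ r2.length = 3 ∧ r3.length = 3
    · exact pvMain r1 r2 r3 hball.1 hball.2.1 hball.2.2
    · have hbad : ∃ r ∈ ([r1, r2, r3] : List (List Int)), r.length ≠ 3 := by
        by_contra hno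
        push Not at hno
        exact hball ⟨hno r1 (by simp), hno r2 (by simp), hno r3 (by simp)⟩
      have hA0 : [r1, r2, r3].foldl pvStepRowA (some (PySem.Set.empty, 0)) = none :=
        pvFoldRowA_badrow [r1, r2, r3] hbad _
      obtain ⟨r, hr, hlen⟩ := hbad
      have hany : ([r1, r2, r3].any (fun row => decide (row.length ≠ 3))) = true :=
        List.any_eq_true.mpr ⟨r, hr, decide_eq_true hlen⟩
      rw [DoiMotKhacNhau, DoiMotKhacNhau_alt, hA0]
      norm_num [hany]
      intro k1 k2 k3
      simp only [List.mem_cons, List.not_mem_nil, or_false] at hr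
      rcases hr with rfl | rfl | rfl
      · exact absurd k1 hlen
      · exact absurd k2 hlen
      · exact absurd k3 hlen
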